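-- pv_equiv track=rewrite | github.com/shawpoufo/tp_rech_op | byListe.py | nextDictFromList
-- ===== SOURCE A (Python) =====
-- import collections
--
-- def nextDictFromList(list):
--     nextDict = {}
--     for arc in list:
--         if(arc[0] in nextDict):
--             nextDict[arc[0]].append(arc[1])
--         else:
--             nextDict[arc[0]] = [arc[1]]
--         if arc[1] not in nextDict:
--             nextDict[arc[1]] = []
--     od = collections.OrderedDict(sorted(nextDict.items()))
--     return od
-- ===== SOURCE B (Python) =====
-- import collections
--
-- def nextDictFromList(list):
--     vertices = set()
--     for arc in list:
--         vertices.add(arc[0])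
--         vertices.add(arc[1])
--     d = collections.OrderedDict((v, []) for v in sorted(vertices))
--     for arc in list:
--         d[arc[0]].append(arc[1])
--     return d
-- ===== Notes on version B (the rewrite author's own statement) =====
-- stated objective: alternative
-- what changed: Replaces A's single pass with per-edge membership branching followed by a sort of the finished dict by a two-phase build: collect the vertex set, create the dict with its keys already in sorted order mapped to empty lists, then append successors in a second unconditional pass.
import Mathlib
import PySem

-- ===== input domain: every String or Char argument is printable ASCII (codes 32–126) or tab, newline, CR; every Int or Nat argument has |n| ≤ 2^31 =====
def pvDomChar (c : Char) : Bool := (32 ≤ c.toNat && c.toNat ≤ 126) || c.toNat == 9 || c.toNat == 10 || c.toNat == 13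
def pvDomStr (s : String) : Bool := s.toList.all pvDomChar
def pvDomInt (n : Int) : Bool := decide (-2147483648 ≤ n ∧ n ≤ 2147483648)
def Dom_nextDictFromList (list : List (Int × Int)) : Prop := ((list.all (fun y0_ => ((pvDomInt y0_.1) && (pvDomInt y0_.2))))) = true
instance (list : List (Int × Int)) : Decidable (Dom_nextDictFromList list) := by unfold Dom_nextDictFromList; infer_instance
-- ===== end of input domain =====

-- B builds the result in two phases (vertex set → sorted empty-list dict → unconditional appends)
-- instead of A's one pass with membership branches followed by a sort; same return value, similar cost.

-- ===== PORT A =====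
-- one loop step of A's for-loop: append/insert for arc[0], then ensure arc[1] is a key
def pvStepA (d : PySem.Dict Int (List Int)) (arc : Int × Int) : PySem.Dict Int (List Int) :=
  let d1 := if d.contains arc.1 = true then d.modify arc.1 [] (fun l => l ++ [arc.2])
            else d.insert arc.1 [arc.2]
  if d1.contains arc.2 = true then d1 else d1.insert arc.2 []

def nextDictFromList (list : List (Int × Int)) : List (Int × List Int) :=
  let nextDict := list.foldl pvStepA PySem.Dict.empty
  -- sorted(nextDict.items()): the dict's keys are distinct, so Python's tuple comparison
  -- never inspects the second component; sorting by the first component is exact here.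
  PySem.List.sorted nextDict.items (fun p => p.1) false

-- ===== PORT B =====
def nextDictFromList_alt (list : List (Int × Int)) : List (Int × List Int) :=
  let vertices := list.foldl (fun s arc => PySem.Set.add (PySem.Set.add s arc.1) arc.2)
    (PySem.Set.empty : PySem.Set Int)
  let d : PySem.Dict Int (List Int) :=
    PySem.Dict.mk ((PySem.List.sorted vertices (fun v => v) false).map (fun v => (v, [])))
  -- d[arc[0]].append(arc[1]): arc[0] is always a key of d, so modify with default [] is exact here
  (list.foldl (fun d arc => d.modify arc.1 [] (fun l => l ++ [arc.2])) d).items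

-- ===== PRECONDITION & SPEC =====
def Spec_nextDictFromList (list : List (Int × Int)) (out : List (Int × List Int)) : Prop := out = nextDictFromList_alt list
instance (list : List (Int × Int)) (out : List (Int × List Int)) : Decidable (Spec_nextDictFromList list out) := by unfold Spec_nextDictFromList; infer_instance

-- ===== CLAIM (what is proved, stated in full; the proofs are below) =====
def Claim_equal_nextDictFromList : Prop := ∀ (list : List (Int × Int)), Dom_nextDictFromList list → Spec_nextDictFromList list (nextDictFromList list)

-- ===== LEMMAS AND PROOFS =====

theorem pvSet_add_def (s : PySem.Set Int) (x : Int) :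
    PySem.Set.add s x = if x ∈ s then s else s ++ [x] := by
  by_cases h : x ∈ s <;> simp [PySem.Set.add, PySem.Set.contains, h]

theorem pvSet_add_of_mem {s : PySem.Set Int} {x : Int} (h : x ∈ s) : PySem.Set.add s x = s := by
  rw [pvSet_add_def, if_pos h]

theorem pvSet_update_of_subset (xs : List Int) (s : PySem.Set Int)
    (h : ∀ x ∈ xs, x ∈ s) : PySem.Set.update s xs = s := by
  induction xs generalizing s with
  | nil => rfl
  | cons a t ih =>
    show List.foldl PySem.Set.add (PySem.Set.add s a) t = s
    rw [pvSet_add_of_mem (h a (by simp))]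
    exact ih s (fun x hx => h x (List.mem_cons_of_mem a hx))

-- the interleaved endpoint fold is the set of the flattened endpoint list
theorem pvVs_eq_ofList (list : List (Int × Int)) (s : PySem.Set Int) :
    list.foldl (fun s arc => PySem.Set.add (PySem.Set.add s arc.1) arc.2) s
      = (list.flatMap (fun a => [a.1, a.2])).foldl PySem.Set.add s := by
  induction list generalizing s with
  | nil => rfl
  | cons a t ih => simp [List.foldl, ih]

-- keys of A's first branch
theorem pvKeys_branch1 (d : PySem.Dict Int (List Int)) (a : Int × Int) :
    (if d.contains a.1 = true then d.modify a.1 [] (fun l => l ++ [a.2])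
     else d.insert a.1 [a.2]).keys = PySem.Set.add d.keys a.1 := by
  cases h : d.contains a.1 with
  | true =>
    rw [if_pos rfl, PySem.Dict.keys_modify, PySem.Dict.keys_insert_of_contains d _ h,
        pvSet_add_of_mem ((PySem.Dict.contains_iff_mem_keys d a.1).mp h)]
  | false =>
    rw [if_neg (by simp), PySem.Dict.keys_insert_of_not_contains d _ h, pvSet_add_def,
        if_neg (fun hm => by simp [(PySem.Dict.contains_iff_mem_keys d a.1).mpr hm] at h)]

-- keys of A's second branch (ensure arc[1] is a key)
theorem pvKeys_ensure (d : PySem.Dict Int (List Int)) (x : Int) :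
    (if d.contains x = true then d else d.insert x []).keys = PySem.Set.add d.keys x := by
  cases h : d.contains x with
  | true => rw [if_pos rfl, pvSet_add_of_mem ((PySem.Dict.contains_iff_mem_keys d x).mp h)]
  | false =>
    rw [if_neg (by simp), PySem.Dict.keys_insert_of_not_contains d _ h, pvSet_add_def,
        if_neg (fun hm => by simp [(PySem.Dict.contains_iff_mem_keys d x).mpr hm] at h)]

theorem pvKeys_stepA (d : PySem.Dict Int (List Int)) (a : Int × Int) :
    (pvStepA d a).keys = PySem.Set.add (PySem.Set.add d.keys a.1) a.2 := by
  simp only [pvStepA]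
  rw [pvKeys_ensure, pvKeys_branch1]

-- A's dict keys evolve exactly like B's vertex set
theorem pvKeysA (list : List (Int × Int)) (d : PySem.Dict Int (List Int)) :
    (list.foldl pvStepA d).keys
      = list.foldl (fun s arc => PySem.Set.add (PySem.Set.add s arc.1) arc.2) d.keys := by
  induction list generalizing d with
  | nil => rfl
  | cons a t ih => rw [List.foldl_cons, List.foldl_cons, ih, pvKeys_stepA]

-- values of A's first branch
theorem pvGetD_branch1 (d : PySem.Dict Int (List Int)) (a : Int × Int) (v : Int) :
    (if d.contains a.1 = true then d.modify a.1 [] (fun l => l ++ [a.2])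
     else d.insert a.1 [a.2]).getD v []
      = d.getD v [] ++ (if a.1 == v then [a.2] else []) := by
  cases h : d.contains a.1 with
  | true =>
    rw [if_pos rfl, PySem.Dict.getD_modify]
    by_cases hv : v = a.1
    · subst hv; simp
    · have hv' : ¬a.1 = v := fun e => hv e.symm
      simp [hv, hv']
  | false =>
    rw [if_neg (by simp), PySem.Dict.getD_insert]
    by_cases hv : v = a.1
    · subst hv; simp [PySem.Dict.getD_of_not_contains d _ h]
    · have hv' : ¬a.1 = v := fun e => hv e.symm
      simp [hv, hv']

-- values of A's second branch: inserting an empty list for a fresh key changes no getD _ []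
theorem pvGetD_ensure (d : PySem.Dict Int (List Int)) (x v : Int) :
    (if d.contains x = true then d else d.insert x []).getD v [] = d.getD v [] := by
  cases h : d.contains x with
  | true => rw [if_pos rfl]
  | false =>
    rw [if_neg (by simp), PySem.Dict.getD_insert]
    by_cases hv : v = x
    · subst hv; simp [PySem.Dict.getD_of_not_contains d _ h]
    · simp [hv]

theorem pvGetD_stepA (d : PySem.Dict Int (List Int)) (a : Int × Int) (v : Int) :
    (pvStepA d a).getD v [] = d.getD v [] ++ (if a.1 == v then [a.2] else []) := by
  simp only [pvStepA]
  rw [pvGetD_ensure, pvGetD_branch1]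

-- A's dict values: each key maps to the successors seen so far
theorem pvValsA (list : List (Int × Int)) (d : PySem.Dict Int (List Int)) (v : Int) :
    (list.foldl pvStepA d).getD v []
      = d.getD v [] ++ (list.filter (fun p => p.1 == v)).map (·.2) := by
  induction list generalizing d with
  | nil => simp
  | cons a t ih =>
    rw [List.foldl_cons, ih, pvGetD_stepA]
    by_cases h : a.1 == v <;> simp [h]

-- the freshly built dict of empty lists looks up to [] everywhere
theorem pvInitGetD (ks : List Int) (v : Int) :
    (PySem.Dict.mk (ks.map (fun k => (k, ([] : List Int))))).getD v [] = [] := by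
  induction ks with
  | nil => simp [PySem.Dict.getD_eq_get?_getD, PySem.Dict.get?]
  | cons a t ih =>
    rw [PySem.Dict.getD_eq_get?_getD] at *
    simp only [List.map_cons, PySem.Dict.get?_mk_cons]
    by_cases h : a == v
    · simp [h]
    · simp [h]; simpa using ih

-- the whole equivalence, stated on the unfolded ports
theorem pvMain (list : List (Int × Int)) :
    PySem.List.sorted (list.foldl pvStepA PySem.Dict.empty).items (fun p => p.1) false
      = (list.foldl (fun d arc => d.modify arc.1 [] (fun l => l ++ [arc.2]))
          (PySem.Dict.mk ((PySem.List.sorted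
              (list.foldl (fun s arc => PySem.Set.add (PySem.Set.add s arc.1) arc.2)
                (PySem.Set.empty : PySem.Set Int)) (fun v => v) false).map
            (fun v => (v, []))))).items := by
  have hvsOf : list.foldl (fun s arc => PySem.Set.add (PySem.Set.add s arc.1) arc.2)
      (PySem.Set.empty : PySem.Set Int)
        = PySem.Set.ofList (list.flatMap (fun a => [a.1, a.2])) := by
    rw [pvVs_eq_ofList]; rfl
  set vs := list.foldl (fun s arc => PySem.Set.add (PySem.Set.add s arc.1) arc.2)
    (PySem.Set.empty : PySem.Set Int) with hvs
  set g : Int → Int × List Int :=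
    fun k => (k, (list.filter (fun p => p.1 == k)).map (·.2)) with hg
  set sv := PySem.List.sorted vs (fun v => v) false with hsv
  set d0 : PySem.Dict Int (List Int) := PySem.Dict.mk (sv.map (fun v => (v, []))) with hd0
  have hkeys0 : d0.keys = sv := by
    simp [hd0, PySem.Dict.keys, List.map_map, Function.comp_def]
  have hnodupsv : sv.Nodup := by
    refine (PySem.List.sorted_perm vs (fun v => v) false).nodup_iff.mpr ?_
    rw [hvsOf]; exact PySem.Set.nodup_ofList _
  set dB := list.foldl (fun d arc => d.modify arc.1 [] (fun l => l ++ [arc.2])) d0 with hdB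
  have hkeysB : dB.keys = sv := by
    rw [hdB, PySem.Dict.keys_foldl_modify_key list (fun a => a.1) []
        (fun _ arc l => l ++ [arc.2]) d0, hkeys0]
    apply pvSet_update_of_subset
    intro x hx
    obtain ⟨a, ha, rfl⟩ := List.mem_map.mp hx
    rw [hsv, PySem.List.mem_sorted, hvsOf, PySem.Set.mem_ofList]
    exact List.mem_flatMap.mpr ⟨a, ha, by simp⟩
  have hitemsB : dB.items = sv.map g := by
    rw [PySem.Dict.items_eq_map_keys dB (by rw [hkeysB]; exact hnodupsv) ([] : List Int), hkeysB]
    refine List.map_congr_left (fun k _ => ?_)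
    rw [hdB, PySem.Dict.getD_foldl_modify_append, hd0, pvInitGetD]
    simp [hg]
  set dA := list.foldl pvStepA PySem.Dict.empty with hdA
  have hkeysA : dA.keys = vs := by
    rw [hdA, pvKeysA, PySem.Dict.keys_empty]; rw [hvs]; rfl
  have hitemsA : dA.items = vs.map g := by
    rw [PySem.Dict.items_eq_map_keys dA
      (by rw [hkeysA, hvsOf]; exact PySem.Set.nodup_ofList _) ([] : List Int), hkeysA]
    refine List.map_congr_left (fun k _ => ?_)
    rw [hdA, pvValsA]
    simp [hg]
  rw [hitemsA, hitemsB]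
  apply PySem.List.sorted_eq_of_perm_of_pairwise_lt
  · exact ((PySem.List.sorted_perm vs (fun v => v) false).map g)
  · refine List.pairwise_map.mpr ?_
    have hp : sv.Pairwise (· < ·) := by
      rw [hsv, hvsOf]; exact PySem.List.sorted_ofList_pairwise_lt _
    simpa [hg] using hp

-- ===== VERDICT (by name: the statement is the Claim_ definition above) =====
theorem nextDictFromList_spec : Claim_equal_nextDictFromList := by
  intro list _
  exact pvMain list
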